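-- pv_equiv track=rewrite | github.com/zxqfd555/masters-work | masters/stop_words/heuristic_max_degree.py | extract_stop_words
-- ===== SOURCE A (Python) =====
-- def get_text_tokens(text, punctuations='.,:;', braces='()[]{}<>\'"|'):
--     text = ' '.join(text.split('\n'))
--     text = ' '.join(text.split('\t'))
--     raw_tokens = text.lower().split()
--     clean_tokens = []
--     for token in raw_tokens:
--         if not token:
--             continue
--         has_punctuation_after = token[-1] in punctuations
--         token = token.strip(punctuations).strip(braces)
--         if token:
--             if has_punctuation_after and (not clean_tokens or clean_tokens[-1] != '.'):
--                 clean_tokens.append('.')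
--             clean_tokens.append(token)
--     return clean_tokens
--
-- def extract_stop_words(text):
--     tokens = get_text_tokens(text)
--     bigrams = {}
--     for token_idx in range(len(tokens)-1):
--         second = tokens[token_idx]
--         first = tokens[token_idx + 1]
--         if first not in bigrams:
--             bigrams[first] = {}
--         if second not in bigrams[first]:
--             bigrams[first][second] = 0
--         bigrams[first][second] += 1
--
--     stopword_candidates = []
--     for token in bigrams:
--         stopword_candidates.append([token, (-len(bigrams[token]), max(bigrams[token].values()))])
--     stopword_candidates.sort(key=lambda x: x[-1])
--
--     return stopword_candidates
-- ===== SOURCE B (Python) =====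
-- def get_text_tokens(text, punctuations='.,:;', braces='()[]{}<>\'"|'):
--     text = ' '.join(text.split('\n'))
--     text = ' '.join(text.split('\t'))
--     raw_tokens = text.lower().split()
--     clean_tokens = []
--     for token in raw_tokens:
--         if not token:
--             continue
--         has_punctuation_after = token[-1] in punctuations
--         token = token.strip(punctuations).strip(braces)
--         if token:
--             if has_punctuation_after and (not clean_tokens or clean_tokens[-1] != '.'):
--                 clean_tokens.append('.')
--             clean_tokens.append(token)
--     return clean_tokens
--
-- def extract_stop_words(text):
--     tokens = get_text_tokens(text)
--
--     # One flat counter over (first, second) pairs, in the same left-to-right scan order.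
--     pair_counts = {}
--     for second, first in zip(tokens, tokens[1:]):
--         key = (first, second)
--         pair_counts[key] = pair_counts.get(key, 0) + 1
--
--     # Group the flat pair counts by their first component (first-appearance order),
--     # maintaining the distinct-neighbor count and the running maximum pair frequency.
--     stats = {}
--     for (first, second), cnt in pair_counts.items():
--         if first not in stats:
--             stats[first] = (0, 0)
--         distinct, best = stats[first]
--         stats[first] = (distinct + 1, cnt if cnt > best else best)
--
--     candidates = [[tok, (-distinct, best)] for tok, (distinct, best) in stats.items()]
--     candidates.sort(key=lambda c: c[-1])
--     return candidates
-- ===== Notes on version B (the rewrite author's own statement) =====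
-- stated objective: alternative
-- what changed: A builds a nested dict-of-dicts of bigram counts and then scans each inner dict; B instead tallies one flat counter keyed on (first, second) pairs and derives each first-token's distinct-neighbor count and maximum pair frequency in a single grouping pass over that counter, before the same stable sort.
import Mathlib
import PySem

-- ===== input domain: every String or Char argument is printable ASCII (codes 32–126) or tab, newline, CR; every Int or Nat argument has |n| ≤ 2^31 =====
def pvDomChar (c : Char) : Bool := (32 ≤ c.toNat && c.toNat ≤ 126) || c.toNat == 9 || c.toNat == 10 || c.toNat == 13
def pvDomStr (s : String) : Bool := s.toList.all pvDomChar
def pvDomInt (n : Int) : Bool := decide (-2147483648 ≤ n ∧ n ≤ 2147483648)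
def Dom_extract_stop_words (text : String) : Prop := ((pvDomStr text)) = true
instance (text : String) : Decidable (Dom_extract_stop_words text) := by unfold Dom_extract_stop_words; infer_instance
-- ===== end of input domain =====

-- B replaces A's nested dict-of-dicts with one flat (first, second) pair counter plus a
-- grouping pass; same exact output, alternative decomposition (no speed claim).

-- ===== PORT A =====
-- helper get_text_tokens (shared verbatim by A and B; B keeps it unchanged)
def get_text_tokens (text : String) : List String :=
  let text := PySem.Str.join " " ((PySem.Str.split? text "\n").getD [])   -- sep ≠ "" so split? = some
  let text := PySem.Str.join " " ((PySem.Str.split? text "\t").getD [])   -- sep ≠ "" so split? = some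
  let raw_tokens := PySem.Str.split₀ (PySem.Str.lower text)
  raw_tokens.foldl (fun clean_tokens token =>
    if token = "" then clean_tokens   -- 'if not token: continue'
    else
      let has_punctuation_after :=
        match PySem.Str.pyGet? token (-1) with
        | some c => PySem.Chars.isIn [c] ".,:;".toList  -- token[-1] in punctuations: 1-char substring membership = char membership
        | none => false                                  -- unreachable: token ≠ ""
      let token := PySem.Str.stripChars (PySem.Str.stripChars token ".,:;") "()[]{}<>'\"|"
      if token ≠ "" then
        let clean_tokens :=
          if has_punctuation_after = true ∧
             (clean_tokens = [] ∨ PySem.List.pyGet? clean_tokens (-1) ≠ some ".") then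
            clean_tokens ++ ["."]
          else clean_tokens
        clean_tokens ++ [token]
      else clean_tokens) []

def extract_stop_words (text : String) : List (String × (Int × Int)) :=
  let tokens := get_text_tokens text
  let bigrams : PySem.Dict String (PySem.Dict String Int) :=
    (PySem.List.pyRange 0 (PySem.List.len tokens - 1) 1).foldl
      (fun bigrams token_idx =>
        let second := PySem.List.pyGetD tokens token_idx ""
        let first := PySem.List.pyGetD tokens (token_idx + 1) ""
        -- 'if first not in bigrams: … = {}', 'if second not in …: … = 0', '+= 1' is one modify of a modify
        bigrams.modify first PySem.Dict.empty (fun inner => inner.modify second 0 (· + 1)))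
      PySem.Dict.empty
  let stopword_candidates :=
    bigrams.items.foldl
      (fun acc p =>
        acc ++ [(p.1, (-(PySem.Dict.size p.2 : Int),
                       (PySem.List.max? p.2.values (fun v => v)).getD 0))])  -- inner dicts nonempty: max? = some
      []
  PySem.List.sorted2 stopword_candidates (fun x => x.2.1) (fun x => x.2.2)

-- ===== PORT B =====
def extract_stop_words_alt (text : String) : List (String × (Int × Int)) :=
  let tokens := get_text_tokens text
  let pair_counts : PySem.Dict (String × String) Int :=
    (tokens.zip (PySem.List.slice tokens (some 1) none)).foldl
      (fun d sf =>
        let key := (sf.2, sf.1)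
        d.insert key (d.getD key 0 + 1))
      PySem.Dict.empty
  let stats : PySem.Dict String (Int × Int) :=
    pair_counts.items.foldl
      (fun st q =>
        st.modify q.1.1 (0, 0) (fun t => (t.1 + 1, if q.2 > t.2 then q.2 else t.2)))
      PySem.Dict.empty
  let candidates := stats.items.map (fun p => (p.1, (-p.2.1, p.2.2)))
  PySem.List.sorted2 candidates (fun c => c.2.1) (fun c => c.2.2)

-- ===== PRECONDITION & SPEC =====
def Spec_extract_stop_words (text : String) (out : List (String × (Int × Int))) : Prop := out = extract_stop_words_alt text
instance (text : String) (out : List (String × (Int × Int))) : Decidable (Spec_extract_stop_words text out) := by unfold Spec_extract_stop_words; infer_instance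

-- ===== CLAIM (what is proved, stated in full; the proofs are below) =====
def Claim_equal_extract_stop_words : Prop := ∀ (text : String), Dom_extract_stop_words text → Spec_extract_stop_words text (extract_stop_words text)

-- ===== LEMMAS AND PROOFS =====

-- A's index loop over range(len(tokens)-1) is the fold over adjacent pairs.
theorem pv_foldl_range_adj {α β : Type} (g : β → α → α → β) (d : α) :
    ∀ (x : α) (t : List α) (init : β),
    (List.range t.length).foldl
        (fun acc k => g acc ((x :: t).getD k d) ((x :: t).getD (k+1) d)) init
      = ((x :: t).zip t).foldl (fun acc p => g acc p.1 p.2) init := by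
  intro x t
  induction t generalizing x with
  | nil => intro init; simp
  | cons y t' ih =>
      intro init
      simp only [List.length_cons]
      rw [List.range_succ_eq_map]
      simp only [List.foldl_cons, List.foldl_map, List.getD_cons_zero, List.getD_cons_succ,
        List.zip_cons_cons]
      exact ih y (g init x y)

theorem pv_loop_eq_zip {β : Type} (g : β → String → String → β) (tokens : List String) (init : β) :
    (PySem.List.pyRange 0 (PySem.List.len tokens - 1) 1).foldl
      (fun acc j => g acc (PySem.List.pyGetD tokens j "") (PySem.List.pyGetD tokens (j+1) "")) init
      = (tokens.zip tokens.tail).foldl (fun acc p => g acc p.1 p.2) init := by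
  cases tokens with
  | nil => simp
  | cons x t =>
      rw [PySem.List.pyRange_one, List.foldl_map]
      have hlen : ((PySem.List.len (x :: t) - 1 - 0)).toNat = t.length := by
        simp [PySem.List.len_eq]
      rw [hlen]
      have hfun : (fun (acc : β) (k : Nat) =>
            g acc (PySem.List.pyGetD (x :: t) (0 + (k : Int)) "")
                  (PySem.List.pyGetD (x :: t) ((0 + (k : Int)) + 1) ""))
          = fun acc k => g acc ((x :: t).getD k "") ((x :: t).getD (k+1) "") := by
        funext acc k
        have h2 : ((0 : Int) + (k : Int)) + 1 = (((k + 1 : Nat)) : Int) := by push_cast; ring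
        have h1 : ((0 : Int) + (k : Int)) = ((k : Nat) : Int) := by omega
        rw [h2, h1, PySem.List.pyGetD_natCast, PySem.List.pyGetD_natCast]
      rw [hfun]
      exact pv_foldl_range_adj g "" x t init

-- A grouping loop 'd.modify (key x) d0 (f x)' read back at one key.
theorem pv_getD_foldl_modify_key {κ ν β : Type} [BEq κ] [LawfulBEq κ] [DecidableEq κ]
    (l : List β) (key : β → κ) (d0 : ν) (f : β → ν → ν) (d : PySem.Dict κ ν) (k : κ) :
    (l.foldl (fun d x => d.modify (key x) d0 (f x)) d).getD k d0
      = (l.filter (fun x => key x == k)).foldl (fun v x => f x v) (d.getD k d0) := by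
  induction l generalizing d with
  | nil => rfl
  | cons x l ih =>
      simp only [List.foldl_cons, List.filter_cons]
      by_cases h : key x = k
      · simp [h, ih]
      · simp [h, ih, PySem.Dict.getD_modify, Ne.symm h]

theorem pv_set_ofList_append_singleton {α : Type} [BEq α] (l : List α) (x : α) :
    PySem.Set.ofList (l ++ [x]) = PySem.Set.add (PySem.Set.ofList l) x := by
  simp [PySem.Set.ofList_eq_foldl, List.foldl_append]

theorem pv_set_ofList_map_add {α β : Type} [BEq α] [LawfulBEq α] [BEq β] [LawfulBEq β]
    (f : α → β) (s : PySem.Set α) (x : α) :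
    PySem.Set.ofList ((PySem.Set.add s x).map f)
      = PySem.Set.add (PySem.Set.ofList (s.map f)) (f x) := by
  by_cases h : x ∈ s
  · have h2 : f x ∈ PySem.Set.ofList (s.map f) := by
      rw [PySem.Set.mem_ofList]; exact List.mem_map_of_mem h
    simp [PySem.Set.add, h, h2]
  · rw [show PySem.Set.add s x = s ++ [x] by simp [PySem.Set.add, h]]
    rw [List.map_append, List.map_singleton, pv_set_ofList_append_singleton]

theorem pv_set_ofList_map_foldl_add {α β : Type} [BEq α] [LawfulBEq α] [BEq β] [LawfulBEq β]
    (f : α → β) :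
    ∀ (l : List α) (s : PySem.Set α),
    PySem.Set.ofList ((l.foldl PySem.Set.add s).map f)
      = PySem.Set.update (PySem.Set.ofList (s.map f)) (l.map f) := by
  intro l
  induction l with
  | nil => intro s; rfl
  | cons x l ih =>
      intro s
      simp only [List.foldl_cons, List.map_cons]
      rw [ih, pv_set_ofList_map_add]
      rfl

-- dedup commutes with an image: set(map f (set l)) = set(map f l)
theorem pv_set_ofList_map_ofList {α β : Type} [BEq α] [LawfulBEq α] [BEq β] [LawfulBEq β]
    (f : α → β) (l : List α) :
    PySem.Set.ofList ((PySem.Set.ofList l).map f) = PySem.Set.ofList (l.map f) := by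
  have := pv_set_ofList_map_foldl_add f l []
  simpa [PySem.Set.ofList_eq_foldl, PySem.Set.update] using this

-- dedup commutes with an injective image: map f (set l) = set (map f l)
theorem pv_map_foldl_add_inj {α β : Type} [BEq α] [LawfulBEq α] [BEq β] [LawfulBEq β]
    (f : α → β) (hf : Function.Injective f) :
    ∀ (l : List α) (s : PySem.Set α),
    ((l.foldl PySem.Set.add s).map f) = (l.map f).foldl PySem.Set.add (s.map f) := by
  intro l
  induction l with
  | nil => intro s; rfl
  | cons x l ih =>
      intro s
      simp only [List.foldl_cons, List.map_cons]
      rw [ih]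
      congr 1
      by_cases h : x ∈ s
      · have hx : f x ∈ s.map f := List.mem_map_of_mem h
        simp [PySem.Set.add, h, hx]
      · have hx : f x ∉ s.map f := by
          intro hm
          rcases List.mem_map.mp hm with ⟨y, hy, hxy⟩
          exact h (hf hxy ▸ hy)
        simp [PySem.Set.add, h, hx]

theorem pv_set_map_inj {α β : Type} [BEq α] [LawfulBEq α] [BEq β] [LawfulBEq β]
    (f : α → β) (hf : Function.Injective f) (l : List α) :
    (PySem.Set.ofList l).map f = PySem.Set.ofList (l.map f) := by
  have := pv_map_foldl_add_inj f hf l []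
  simpa [PySem.Set.ofList_eq_foldl] using this

-- dedup commutes with filter
theorem pv_foldl_add_filter {α : Type} [BEq α] [LawfulBEq α] (p : α → Bool) :
    ∀ (l : List α) (s : PySem.Set α),
    ((l.foldl PySem.Set.add s).filter p) = (l.filter p).foldl PySem.Set.add (s.filter p) := by
  intro l
  induction l with
  | nil => intro s; rfl
  | cons x l ih =>
      intro s
      simp only [List.foldl_cons, List.filter_cons]
      by_cases hp : p x = true
      · rw [if_pos hp]
        simp only [List.foldl_cons]
        rw [ih]
        congr 1
        by_cases h : x ∈ s
        · have hx : x ∈ s.filter p := List.mem_filter.mpr ⟨h, hp⟩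
          simp [PySem.Set.add, h, hx]
        · have hx : x ∉ s.filter p := fun hm => h (List.mem_filter.mp hm).1
          simp [PySem.Set.add, h, hx, List.filter_append, hp]
      · rw [if_neg hp]
        rw [ih]
        congr 1
        by_cases h : x ∈ s
        · simp [PySem.Set.add, h]
        · simp [PySem.Set.add, h, List.filter_append, hp]

theorem pv_set_filter {α : Type} [BEq α] [LawfulBEq α] (p : α → Bool) (l : List α) :
    (PySem.Set.ofList l).filter p = PySem.Set.ofList (l.filter p) := by
  have := pv_foldl_add_filter p l []
  simpa [PySem.Set.ofList_eq_foldl] using this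

-- a running 'if c > m then c else m' from 0 over nonnegative values is max(values) with default 0
theorem pv_foldl_pymax (t : List Int) (ht : ∀ v ∈ t, 0 ≤ v) :
    t.foldl (fun m c => if c > m then c else m) 0
      = (PySem.List.max? t (fun v => v)).getD 0 := by
  have hstep : (fun (m c : Int) => if c > m then c else m) = (fun m c => max m c) := by
    funext m c
    rcases lt_or_ge m c with h | h
    · simp [h, max_def]; omega
    · have : ¬ (c > m) := not_lt.mpr h
      simp [this, max_def]; omega
  cases t with
  | nil => rfl
  | cons x l =>
      rw [PySem.List.max?_id_cons]
      simp only [Option.getD_some, List.foldl_cons, hstep]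
      have hx : max 0 x = x := max_eq_right (ht x (List.mem_cons_self))
      rw [hx]

theorem pv_foldl_stat (c : String → Int) :
    ∀ (L : List String) (a b : Int),
    L.foldl (fun t y => (t.1 + 1, if c y > t.2 then c y else t.2)) (a, b)
      = (a + (L.length : Int), (L.map c).foldl (fun m v => if v > m then v else m) b) := by
  intro L
  induction L with
  | nil => intro a b; simp
  | cons x L ih =>
      intro a b
      simp only [List.foldl_cons, List.map_cons]
      rw [ih]
      congr 1
      push_cast [List.length_cons]
      ring

theorem pv_update_nil {α : Type} [BEq α] (l : List α) :
    PySem.Set.update ([] : PySem.Set α) l = PySem.Set.ofList l := rfl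

-- Proof-layer normal form: per first-token stats computed from the raw pair list.
def pvSecondsFor (pairs : List (String × String)) (f : String) : List String :=
  (pairs.filter (fun p => p.2 == f)).map (fun p => p.1)

def pvCommon (pairs : List (String × String)) : List (String × (Int × Int)) :=
  (PySem.Set.ofList (pairs.map (fun p => p.2))).map (fun f =>
    (f, (-((PySem.Set.ofList (pvSecondsFor pairs f)).length : Int),
        (PySem.List.max? ((PySem.Set.ofList (pvSecondsFor pairs f)).map
            (fun s => ((pvSecondsFor pairs f).count s : Int))) (fun v => v)).getD 0)))

theorem pv_A_eq (pairs : List (String × String)) :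
    ((pairs.foldl
        (fun bigrams p =>
          bigrams.modify p.2 PySem.Dict.empty (fun inner => inner.modify p.1 0 (· + 1)))
        (PySem.Dict.empty : PySem.Dict String (PySem.Dict String Int))).items.foldl
      (fun acc p => acc ++ [(p.1, (-(PySem.Dict.size p.2 : Int),
          (PySem.List.max? p.2.values (fun v => v)).getD 0))]) [])
      = pvCommon pairs := by
  rw [PySem.List.foldl_append_singleton_eq_map]
  rw [List.nil_append]
  set bigA := pairs.foldl
      (fun bigrams p =>
        bigrams.modify p.2 PySem.Dict.empty (fun inner => inner.modify p.1 0 (· + 1)))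
      (PySem.Dict.empty : PySem.Dict String (PySem.Dict String Int)) with hbig
  have hkeys : bigA.keys = PySem.Set.ofList (pairs.map (fun p => p.2)) := by
    rw [hbig, PySem.Dict.keys_foldl_modify_key pairs (fun p => p.2) PySem.Dict.empty
      (fun _ p inner => inner.modify p.1 0 (· + 1)) PySem.Dict.empty]
    rfl
  have hnodup : bigA.keys.Nodup := by
    rw [hbig]
    exact PySem.Dict.nodup_keys_foldl_modify_key pairs (fun p => p.2) PySem.Dict.empty
      (fun _ p inner => inner.modify p.1 0 (· + 1)) PySem.Dict.empty
      PySem.Dict.nodup_keys_empty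
  rw [PySem.Dict.items_eq_map_keys bigA hnodup PySem.Dict.empty, hkeys, List.map_map]
  unfold pvCommon
  refine List.map_congr_left ?_
  intro f _
  have hgd : bigA.getD f PySem.Dict.empty = PySem.Dict.counter (pvSecondsFor pairs f) := by
    rw [hbig, pv_getD_foldl_modify_key pairs (fun p => p.2) PySem.Dict.empty
      (fun p inner => inner.modify p.1 0 (· + 1)) PySem.Dict.empty f]
    rw [PySem.Dict.getD_empty]
    rw [PySem.Dict.counter_eq_foldl]
    unfold pvSecondsFor
    rw [List.foldl_map]
  simp only [Function.comp_apply, hgd]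
  congr 1
  congr 1
  · -- sizes
    simp [PySem.Dict.size, PySem.Dict.items_counter]
  · -- values
    congr 2
    simp [PySem.Dict.values, PySem.Dict.items_counter, List.map_map]

theorem pv_count_eq (pairs : List (String × String)) (f s : String) :
    (pairs.map (fun p => (p.2, p.1))).count (f, s)
      = ((pairs.filter (fun p => p.2 == f)).map (fun p => p.1)).count s := by
  have hinj : Function.Injective (fun p : String × String => (p.2, p.1)) := by
    intro ⟨a, b⟩ ⟨c, d⟩ h
    simpa [Prod.ext_iff, and_comm] using h
  have h1 : (pairs.map (fun p => (p.2, p.1))).count (f, s) = pairs.count (s, f) :=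
    List.count_map_of_injective pairs _ hinj (s, f)
  rw [h1]
  simp only [List.count, List.countP_map, List.countP_filter]
  refine List.countP_congr ?_
  intro p _
  cases p with
  | mk a b => simp [Prod.ext_iff]

theorem pv_B_eq (pairs : List (String × String)) :
    ((pairs.foldl
          (fun d sf => d.insert (sf.2, sf.1) (d.getD (sf.2, sf.1) 0 + 1))
          (PySem.Dict.empty : PySem.Dict (String × String) Int)).items.foldl
        (fun st q => st.modify q.1.1 (0, 0)
          (fun t => (t.1 + 1, if q.2 > t.2 then q.2 else t.2)))
        (PySem.Dict.empty : PySem.Dict String (Int × Int))).items.map (fun p => (p.1, (-p.2.1, p.2.2)))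
      = pvCommon pairs := by
  have hpc : (pairs.foldl
        (fun d sf => d.insert (sf.2, sf.1) (d.getD (sf.2, sf.1) 0 + 1))
        (PySem.Dict.empty : PySem.Dict (String × String) Int))
      = PySem.Dict.counter (pairs.map (fun p => (p.2, p.1))) := by
    rw [← PySem.Dict.foldl_insert_getD_add_one_eq_counter, List.foldl_map]
  rw [hpc]
  set sw := pairs.map (fun p => (p.2, p.1)) with hsw
  set stats := (PySem.Dict.counter sw).items.foldl
      (fun st q => st.modify q.1.1 (0, 0)
        (fun t => (t.1 + 1, if q.2 > t.2 then q.2 else t.2)))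
      (PySem.Dict.empty : PySem.Dict String (Int × Int)) with hstats
  have hkeys : stats.keys = PySem.Set.ofList (pairs.map (fun p => p.2)) := by
    rw [hstats, PySem.Dict.keys_foldl_modify_key (PySem.Dict.counter sw).items
      (fun q => q.1.1) (0, 0) (fun _ q t => (t.1 + 1, if q.2 > t.2 then q.2 else t.2))
      PySem.Dict.empty, PySem.Dict.keys_empty, pv_update_nil]
    have h1 : (PySem.Dict.counter sw).items.map (fun q => q.1.1)
        = (PySem.Set.ofList sw).map (fun k => k.1) := by
      rw [PySem.Dict.items_counter, List.map_map]
      rfl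
    rw [h1, pv_set_ofList_map_ofList, hsw, List.map_map]
    rfl
  have hnodup : stats.keys.Nodup := by
    rw [hstats]
    exact PySem.Dict.nodup_keys_foldl_modify_key _ _ _ _ _ PySem.Dict.nodup_keys_empty
  rw [PySem.Dict.items_eq_map_keys stats hnodup (0, 0), hkeys, List.map_map]
  unfold pvCommon
  refine List.map_congr_left ?_
  intro f _
  simp only [Function.comp_apply]
  have hgd : stats.getD f (0, 0)
      = (((PySem.Set.ofList (pvSecondsFor pairs f)).length : Int),
         (PySem.List.max? ((PySem.Set.ofList (pvSecondsFor pairs f)).map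
            (fun s => ((pvSecondsFor pairs f).count s : Int))) (fun v => v)).getD 0) := by
    rw [hstats, pv_getD_foldl_modify_key (PySem.Dict.counter sw).items (fun q => q.1.1) (0, 0)
      (fun q t => (t.1 + 1, if q.2 > t.2 then q.2 else t.2)) PySem.Dict.empty f]
    rw [PySem.Dict.getD_empty]
    -- filter the counter items down to the pairs with first component f
    rw [PySem.Dict.items_counter]
    rw [List.filter_map]
    have hfil : (PySem.Set.ofList sw).filter ((fun q : (String × String) × Int => q.1.1 == f) ∘
          (fun k => (k, (sw.count k : Int))))
        = (PySem.Set.ofList (pvSecondsFor pairs f)).map (fun s => (f, s)) := by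
      have e1 : ((fun q : (String × String) × Int => q.1.1 == f) ∘
          (fun k : String × String => (k, (sw.count k : Int)))) = fun k => k.1 == f := rfl
      rw [e1, pv_set_filter]
      rw [hsw, List.filter_map]
      have e2 : ((fun k : String × String => k.1 == f) ∘ (fun p : String × String => (p.2, p.1)))
          = fun p => p.2 == f := rfl
      rw [e2]
      have e3 : (pairs.filter (fun p => p.2 == f)).map (fun p : String × String => (p.2, p.1))
          = (pvSecondsFor pairs f).map (fun s => (f, s)) := by
        unfold pvSecondsFor
        rw [List.map_map]
        refine List.map_congr_left ?_
        intro p hp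
        have := (List.mem_filter.mp hp).2
        have hf : p.2 = f := by simpa using this
        simp [hf]
      rw [e3, ← pv_set_map_inj]
      intro a b h
      simpa using h
    rw [hfil, List.map_map, List.foldl_map]
    simp only [Function.comp_apply]
    have hcnt : ∀ y : String, ((sw.count (f, y) : Nat) : Int)
        = (((pvSecondsFor pairs f).count y : Nat) : Int) := by
      intro y
      have := pv_count_eq pairs f y
      simpa [pvSecondsFor, hsw] using congrArg (Nat.cast : Nat → Int) this
    simp only [hcnt]
    rw [pv_foldl_stat (fun y => (((pvSecondsFor pairs f).count y : Nat) : Int))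
      (PySem.Set.ofList (pvSecondsFor pairs f)) 0 0]
    rw [pv_foldl_pymax _ (by
      intro v hv
      rcases List.mem_map.mp hv with ⟨s, _, rfl⟩
      positivity)]
    simp
  rw [hgd]

-- the two pipelines on an arbitrary token list
theorem pv_pipeline (tokens : List String) :
    PySem.List.sorted2
      (((PySem.List.pyRange 0 (PySem.List.len tokens - 1) 1).foldl
          (fun bigrams token_idx =>
            bigrams.modify (PySem.List.pyGetD tokens (token_idx + 1) "") PySem.Dict.empty
              (fun inner => inner.modify (PySem.List.pyGetD tokens token_idx "") 0 (· + 1)))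
          (PySem.Dict.empty : PySem.Dict String (PySem.Dict String Int))).items.foldl
        (fun acc p => acc ++ [(p.1, (-(PySem.Dict.size p.2 : Int),
            (PySem.List.max? p.2.values (fun v => v)).getD 0))]) [])
      (fun x => x.2.1) (fun x => x.2.2)
    = (fun cand => PySem.List.sorted2 cand (fun c => c.2.1) (fun c => c.2.2))
      ((((tokens.zip (PySem.List.slice tokens (some 1) none)).foldl
          (fun d sf => d.insert (sf.2, sf.1) (d.getD (sf.2, sf.1) 0 + 1))
          (PySem.Dict.empty : PySem.Dict (String × String) Int)).items.foldl
        (fun st q => st.modify q.1.1 (0, 0)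
          (fun t => (t.1 + 1, if q.2 > t.2 then q.2 else t.2)))
        (PySem.Dict.empty : PySem.Dict String (Int × Int))).items.map (fun p => (p.1, (-p.2.1, p.2.2)))) := by
  rw [PySem.List.slice_from_one]
  rw [pv_loop_eq_zip (fun (d : PySem.Dict String (PySem.Dict String Int)) s f =>
    d.modify f PySem.Dict.empty (fun inner => inner.modify s 0 (· + 1))) tokens PySem.Dict.empty]
  rw [pv_A_eq, pv_B_eq]

-- ===== VERDICT (by name: the statement is the Claim_ definition above) =====
theorem extract_stop_words_spec : Claim_equal_extract_stop_words := by
  unfold Claim_equal_extract_stop_words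
  intro text _
  unfold Spec_extract_stop_words
  exact pv_pipeline (get_text_tokens text)
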